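-- pv_equiv track=rewrite | github.com/Ruiying-Ma/SHED | script_python/header_identification_raw_llm.py | _parse_md
-- ===== SOURCE A (Python) =====
-- def _parse_md(raw_md_str_list: list):
--     md_lines = []
--     for raw_md_str in raw_md_str_list:
--         if raw_md_str.strip().startswith("```markdown") and raw_md_str.strip().endswith("```"):
--             md_str = raw_md_str.strip()[len("```markdown"): -len("```")]
--         else:
--             md_str = raw_md_str
--         md_lines += md_str.splitlines()
--
--     header_list = []
--     cur_line = ""
--     for line in md_lines:
--         if line.startswith("#"):
--             if cur_line.startswith("#"):
--                 header_list.append(cur_line)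
--             cur_line = line
--         else:
--             cur_line += line
--     if cur_line.startswith("#"):
--         header_list.append(cur_line)
--
--     return header_list
-- ===== SOURCE B (Python) =====
-- def _parse_md(raw_md_str_list: list):
--     md_lines = [line
--                 for raw in raw_md_str_list
--                 for line in ((raw.strip()[len("```markdown"):-len("```")]
--                               if raw.strip().startswith("```markdown") and raw.strip().endswith("```")
--                               else raw).splitlines())]
--     # two-phase: find header positions, then slice-and-join each group
--     idxs = [i for i, line in enumerate(md_lines) if line.startswith("#")]
--     return ["".join(md_lines[a:b])
--             for a, b in zip(idxs, idxs[1:] + [len(md_lines)])]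
-- ===== Notes on version B (the rewrite author's own statement) =====
-- stated objective: alternative
-- what changed: Replaces the single-pass accumulate-and-flush state machine (carry cur_line, flush on the next header and once after the loop) by a staged index-then-slice pass: collect the indices of header lines, then join the slice of md_lines between consecutive header indices.
import Mathlib
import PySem

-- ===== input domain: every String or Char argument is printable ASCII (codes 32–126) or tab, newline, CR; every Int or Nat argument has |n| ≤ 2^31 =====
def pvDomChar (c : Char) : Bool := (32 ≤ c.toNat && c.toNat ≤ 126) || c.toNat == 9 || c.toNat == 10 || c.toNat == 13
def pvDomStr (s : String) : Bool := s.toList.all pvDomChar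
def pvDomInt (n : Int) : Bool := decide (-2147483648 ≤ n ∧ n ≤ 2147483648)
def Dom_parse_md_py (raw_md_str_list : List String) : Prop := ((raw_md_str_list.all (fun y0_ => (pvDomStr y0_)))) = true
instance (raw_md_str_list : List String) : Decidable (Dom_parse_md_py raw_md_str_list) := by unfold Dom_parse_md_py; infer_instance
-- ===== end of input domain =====

-- B replaces A's single-pass accumulate-and-flush state machine by a staged
-- index-then-slice pass (collect header indices, then join the slice between
-- consecutive header indices); same O(n) cost, different decomposition.

-- ===== PORT A =====
def parse_md_py (raw_md_str_list : List String) : List String :=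
  let md_lines := raw_md_str_list.foldl (fun acc raw_md_str =>
    let md_str :=
      if PySem.Str.startswith (PySem.Str.strip raw_md_str) "```markdown" &&
         PySem.Str.endswith (PySem.Str.strip raw_md_str) "```" then
        PySem.Str.slice (PySem.Str.strip raw_md_str) (some 11) (some (-3))
      else raw_md_str
    acc ++ PySem.Str.splitlines md_str) []
  let fin := md_lines.foldl (fun (st : List String × String) line =>
    if PySem.Str.startswith line "#" then
      (if PySem.Str.startswith st.2 "#" then st.1 ++ [st.2] else st.1, line)
    else (st.1, st.2 ++ line)) ([], "")
  if PySem.Str.startswith fin.2 "#" then fin.1 ++ [fin.2] else fin.1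

-- ===== PORT B =====
def parse_md_py_alt (raw_md_str_list : List String) : List String :=
  let md_lines := raw_md_str_list.flatMap (fun raw =>
    PySem.Str.splitlines (
      if PySem.Str.startswith (PySem.Str.strip raw) "```markdown" &&
         PySem.Str.endswith (PySem.Str.strip raw) "```" then
        PySem.Str.slice (PySem.Str.strip raw) (some 11) (some (-3))
      else raw))
  let idxs := ((PySem.List.enumerate md_lines).filter
      (fun p => PySem.Str.startswith p.2 "#")).map (·.1)
  (idxs.zip (idxs.drop 1 ++ [(md_lines.length : Int)])).map
    (fun ab => PySem.Str.join "" (PySem.List.slice md_lines (some ab.1) (some ab.2)))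

-- ===== PRECONDITION & SPEC =====
def Spec_parse_md_py (raw_md_str_list : List String) (out : List String) : Prop := out = parse_md_py_alt raw_md_str_list
instance (raw_md_str_list : List String) (out : List String) : Decidable (Spec_parse_md_py raw_md_str_list out) := by unfold Spec_parse_md_py; infer_instance

-- ===== CLAIM (what is proved, stated in full; the proofs are below) =====
def Claim_equal_parse_md_py : Prop := ∀ (raw_md_str_list : List String), Dom_parse_md_py raw_md_str_list → Spec_parse_md_py raw_md_str_list (parse_md_py raw_md_str_list)

-- ===== LEMMAS AND PROOFS =====

-- header positions of the line list, as naturals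
def natIdxs : List String → List Nat
  | [] => []
  | l :: ls =>
    if PySem.Str.startswith l "#" then 0 :: (natIdxs ls).map (· + 1)
    else (natIdxs ls).map (· + 1)

-- reference right fold: (finished header groups, pending prefix before the first header)
def refG (ls : List String) : List String × String :=
  ls.foldr (fun line st =>
    if PySem.Str.startswith line "#" then ((line ++ st.2) :: st.1, "")
    else (st.1, line ++ st.2)) ([], "")

-- B's groups, restated over natural indices and drop/take
def hdrGroups (ls : List String) : List String :=
  ((natIdxs ls).zip ((natIdxs ls).drop 1 ++ [ls.length])).map
    (fun ab => PySem.Str.join "" ((ls.drop ab.1).take (ab.2 - ab.1)))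

lemma join_empty_nil : PySem.Str.join "" [] = "" := by
  apply String.toList_inj.mp
  simp [PySem.Str.toList_join, PySem.Chars.join, List.intercalate]

lemma join_empty_cons (a : String) (l : List String) :
    PySem.Str.join "" (a :: l) = a ++ PySem.Str.join "" l := by
  apply String.toList_inj.mp
  cases l with
  | nil => simp [PySem.Str.toList_join, PySem.Chars.join, List.intercalate]
  | cons b t => simp [PySem.Str.toList_join, PySem.Chars.join_cons_cons]

-- a line not starting with '#' cannot change whether the accumulated string starts with '#'
lemma startswith_append_of_not (cur l : String)
    (hl : PySem.Str.startswith l "#" = false) :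
    PySem.Str.startswith (cur ++ l) "#" = PySem.Str.startswith cur "#" := by
  simp only [PySem.Str.startswith_eq, String.toList_append] at *
  cases hc : cur.toList with
  | nil => simpa [hc] using hl
  | cons c t =>
    rw [Bool.eq_iff_iff, PySem.Chars.startswith_iff, PySem.Chars.startswith_iff]
    show ('#'.toString.toList) <+: (c :: t ++ l.toList) ↔ ('#'.toString.toList) <+: (c :: t)
    simp [List.cons_prefix_cons, Char.toString]

-- A's forward state machine, characterized by the reference right fold
lemma phase2_eq (ls : List String) (acc : List String) (cur : String) :
    (let fin := ls.foldl (fun (st : List String × String) line =>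
        if PySem.Str.startswith line "#" then
          (if PySem.Str.startswith st.2 "#" then st.1 ++ [st.2] else st.1, line)
        else (st.1, st.2 ++ line)) (acc, cur)
     if PySem.Str.startswith fin.2 "#" then fin.1 ++ [fin.2] else fin.1)
    = acc ++
      (if PySem.Str.startswith cur "#" then (cur ++ (refG ls).2) :: (refG ls).1
       else (refG ls).1) := by
  induction ls generalizing acc cur with
  | nil =>
    simp only [List.foldl_nil, refG, List.foldr_nil]
    split_ifs <;> simp
  | cons l ls ih =>
    simp only [List.foldl_cons, refG, List.foldr_cons] at *
    by_cases hl : PySem.Str.startswith l "#" = true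
    · simp only [hl, if_true, ih]
      split_ifs <;> simp
    · simp only [Bool.not_eq_true] at hl
      simp only [hl, Bool.false_eq_true, if_false, ih,
        startswith_append_of_not cur l hl]
      split_ifs <;> simp [String.append_assoc]

-- the port's enumerate-filter-map index pass computes natIdxs (shifted by the start)
lemma enumIdxs (ls : List String) (s : Int) :
    ((PySem.List.enumerate ls s).filter
      (fun p => PySem.Str.startswith p.2 "#")).map (·.1)
    = (natIdxs ls).map (fun k => s + Int.ofNat k) := by
  induction ls generalizing s with
  | nil => simp [PySem.List.enumerate_nil, natIdxs]
  | cons l ls ih =>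
    simp only [PySem.List.enumerate_cons, List.filter_cons, natIdxs]
    by_cases hl : PySem.Str.startswith l "#" = true
    · simp only [hl, if_true, List.map_cons, ih]
      refine congrArg₂ List.cons (by simp) ?_
      rw [List.map_map]
      refine List.map_congr_left (fun k _ => ?_)
      simp only [Function.comp_apply, Int.ofNat_eq_natCast]
      push_cast; ring
    · simp only [Bool.not_eq_true] at hl
      simp only [hl, Bool.false_eq_true, if_false, ih]
      rw [List.map_map]
      refine List.map_congr_left (fun k _ => ?_)
      simp only [Function.comp_apply, Int.ofNat_eq_natCast]
      push_cast; ring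

-- the index-then-slice groups equal the reference right fold
lemma hdrGroups_eq (ls : List String) :
    hdrGroups ls = (refG ls).1 ∧
    PySem.Str.join "" (ls.take ((natIdxs ls).headD ls.length)) = (refG ls).2 := by
  induction ls with
  | nil => exact ⟨rfl, join_empty_nil⟩
  | cons l ls ih =>
    obtain ⟨ih1, ih2⟩ := ih
    have key : ∀ (n : List Nat) (L : Nat),
        ((n.map (· + 1)).zip ((n.map (· + 1)).drop 1 ++ [L + 1])).map
          (fun ab => PySem.Str.join "" (((l :: ls).drop ab.1).take (ab.2 - ab.1)))
        = (n.zip (n.drop 1 ++ [L])).map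
          (fun ab => PySem.Str.join "" ((ls.drop ab.1).take (ab.2 - ab.1))) := by
      intro n L
      have hb : (n.map (· + 1)).drop 1 ++ [L + 1] = (n.drop 1 ++ [L]).map (· + 1) := by
        simp
      rw [hb, List.zip_map, List.map_map]
      refine List.map_congr_left (fun ab _ => ?_)
      simp [Nat.succ_sub_succ]
    by_cases hl : PySem.Str.startswith l "#" = true
    · have hG : refG (l :: ls) = ((l ++ (refG ls).2) :: (refG ls).1, "") := by
        simp only [refG, List.foldr_cons, hl, if_true]
      have hsplit : hdrGroups (l :: ls)
          = PySem.Str.join "" ((l :: ls).take ((natIdxs ls).headD ls.length + 1))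
            :: hdrGroups ls := by
        cases hn : natIdxs ls with
        | nil =>
          simp only [hdrGroups, natIdxs, hl, if_true, hn, List.map_nil, List.length_cons,
            List.drop_succ_cons, List.drop_nil, List.nil_append, List.zip_cons_cons,
            List.zip_nil_left, List.map_cons, List.map_nil, List.headD_nil]
          simp
        | cons j rest =>
          simp only [hdrGroups, natIdxs, hl, if_true, hn, List.map_cons, List.length_cons,
            List.drop_succ_cons, List.drop_zero, List.map_cons,
            List.headD_cons]
          refine congrArg₂ List.cons (by simp) ?_
          have hk := key (j :: rest) ls.length
          simp only [List.map_cons, List.drop_succ_cons, List.drop_zero] at hk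
          simpa [List.zip] using hk
      refine ⟨?_, ?_⟩
      · rw [hsplit, hG, List.take_succ_cons, join_empty_cons, ih2, ih1]
      · rw [hG]
        have h0 : (natIdxs (l :: ls)).headD (l :: ls).length = 0 := by
          simp only [natIdxs, hl, if_true, List.headD_cons]
        rw [h0, List.take_zero, join_empty_nil]
    · have hlf : PySem.Str.startswith l "#" = false := by simpa using hl
      have hG : refG (l :: ls) = ((refG ls).1, l ++ (refG ls).2) := by
        simp only [refG, List.foldr_cons, hlf, Bool.false_eq_true, if_false]
      refine ⟨?_, ?_⟩
      · have hsame : hdrGroups (l :: ls) = hdrGroups ls := by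
          simp only [hdrGroups, natIdxs, hlf, Bool.false_eq_true, if_false, List.length_cons]
          exact key (natIdxs ls) ls.length
        rw [hsame, hG, ih1]
      · have hhead : ((natIdxs ls).map (· + 1)).headD (l :: ls).length
            = (natIdxs ls).headD ls.length + 1 := by
          cases natIdxs ls <;> simp
        simp only [natIdxs, hlf, Bool.false_eq_true, if_false, hG]
        rw [hhead, List.take_succ_cons, join_empty_cons, ih2]

-- ===== VERDICT (by name: the statement is the Claim_ definition above) =====
theorem parse_md_py_spec : Claim_equal_parse_md_py := by
  intro raw _
  unfold Spec_parse_md_py parse_md_py parse_md_py_alt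
  rw [PySem.List.foldl_append_eq_flatMap]
  simp only [List.nil_append]
  generalize (raw.flatMap _) = md
  -- A side
  have hA := phase2_eq md [] ""
  simp only [List.nil_append] at hA
  rw [hA]
  have h0 : PySem.Str.startswith "" "#" = false := by decide
  simp only [h0, Bool.false_eq_true, if_false]
  -- B side
  rw [enumIdxs md 0]
  simp only [Int.ofNat_eq_natCast]
  have hz : ((natIdxs md).map (fun k => (0 : Int) + (k : Nat))).zip
        (((natIdxs md).map (fun k => (0 : Int) + (k : Nat))).drop 1 ++ [(md.length : Int)])
      = ((natIdxs md).zip ((natIdxs md).drop 1 ++ [md.length])).map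
        (fun ab => ((ab.1 : Int), (ab.2 : Int))) := by
    have : ((natIdxs md).map (fun k => (0 : Int) + (k : Nat))).drop 1 ++ [(md.length : Int)]
        = ((natIdxs md).drop 1 ++ [md.length]).map (fun k => (0 : Int) + (k : Nat)) := by
      simp
    rw [this, List.zip_map]
    simp
  rw [hz, List.map_map, ← (hdrGroups_eq md).1]
  unfold hdrGroups
  refine List.map_congr_left (fun ab _ => ?_)
  simp only [Function.comp_apply]
  rw [PySem.List.slice_natCast]
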